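-- pv_equiv track=rewrite | github.com/MrBrantCode/unitest_baseline | mut_generate/mist_train_cf/cf_88557/solution.py | count_quadruples
-- ===== SOURCE A (Python) =====
-- def count_quadruples(nums):
--     count = 0
--     for i in range(len(nums)):
--         for j in range(i+1, len(nums)):
--             for k in range(j+1, len(nums)):
--                 for l in range(k+1, len(nums)):
--                     if nums[i] != nums[j] != nums[k] != nums[l]:
--                         if nums[i] + nums[j] + nums[k] + nums[l] == 0:
--                             count += 1
--     return count
-- ===== SOURCE B (Python) =====
-- def count_quadruples(nums):
--     # One pass per (j, k, l) triple; the matching first indices i < j are counted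
--     # via a running value-frequency dict of the prefix nums[:j]  -- O(n^3) vs A's O(n^4).
--     n = len(nums)
--     cnt = {}
--     total = 0
--     for j in range(n):
--         nj = nums[j]
--         for k in range(j + 1, n):
--             nk = nums[k]
--             if nj != nk:
--                 for l in range(k + 1, n):
--                     nl = nums[l]
--                     if nk != nl:
--                         t = -(nj + nk + nl)
--                         if t != nj:
--                             total += cnt.get(t, 0)
--         cnt[nj] = cnt.get(nj, 0) + 1
--     return total
-- ===== Notes on version B (the rewrite author's own statement) =====
-- stated objective: faster
-- what changed: A scans all i<j<k<l quadruples; B iterates only (j,k,l) triples and, keeping a running frequency dict of the prefix values nums[:j], counts the matching first elements with one dict lookup, removing the fourth nested loop.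
import Mathlib
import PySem

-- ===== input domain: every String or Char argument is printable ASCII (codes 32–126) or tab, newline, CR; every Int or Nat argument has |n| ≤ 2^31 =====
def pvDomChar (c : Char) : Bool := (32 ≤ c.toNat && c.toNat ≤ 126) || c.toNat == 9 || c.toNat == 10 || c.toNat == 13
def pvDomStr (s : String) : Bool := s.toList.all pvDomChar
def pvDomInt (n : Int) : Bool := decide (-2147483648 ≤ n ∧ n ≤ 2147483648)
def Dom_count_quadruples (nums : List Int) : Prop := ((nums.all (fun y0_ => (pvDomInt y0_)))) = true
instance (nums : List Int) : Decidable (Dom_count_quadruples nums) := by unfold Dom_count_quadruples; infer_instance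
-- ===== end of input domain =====

-- B replaces A's innermost scan by one prefix-frequency-dict lookup per (j,k,l) triple
-- (three nested loops instead of four); objective: faster.

-- ===== PORT A =====
def count_quadruples (nums : List Int) : Int :=
  (PySem.List.pyRange 0 nums.length).foldl (fun count i =>
    (PySem.List.pyRange (i+1) nums.length).foldl (fun count j =>
      (PySem.List.pyRange (j+1) nums.length).foldl (fun count k =>
        (PySem.List.pyRange (k+1) nums.length).foldl (fun count l =>
          if (PySem.List.pyGetD nums i 0 ≠ PySem.List.pyGetD nums j 0 ∧
              PySem.List.pyGetD nums j 0 ≠ PySem.List.pyGetD nums k 0 ∧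
              PySem.List.pyGetD nums k 0 ≠ PySem.List.pyGetD nums l 0) then
            (if PySem.List.pyGetD nums i 0 + PySem.List.pyGetD nums j 0 +
                PySem.List.pyGetD nums k 0 + PySem.List.pyGetD nums l 0 = 0 then
              count + 1
            else count)
          else count) count) count) count) 0

-- ===== PORT B =====
def count_quadruples_alt (nums : List Int) : Int :=
  let n : Int := nums.length
  ((PySem.List.pyRange 0 n).foldl (fun st j =>
      let nj := PySem.List.pyGetD nums j 0
      let total := (PySem.List.pyRange (j+1) n).foldl (fun total k =>
          let nk := PySem.List.pyGetD nums k 0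
          if nj ≠ nk then
            (PySem.List.pyRange (k+1) n).foldl (fun total l =>
                let nl := PySem.List.pyGetD nums l 0
                if nk ≠ nl then
                  let t := -(nj + nk + nl)
                  if t ≠ nj then total + st.1.getD t 0 else total
                else total) total
          else total) st.2
      (st.1.insert nj (st.1.getD nj 0 + 1), total))
    (PySem.Dict.empty, 0)).2

-- ===== PRECONDITION & SPEC =====
def Spec_count_quadruples (nums : List Int) (out : Int) : Prop := out = count_quadruples_alt nums
instance (nums : List Int) (out : Int) : Decidable (Spec_count_quadruples nums out) := by unfold Spec_count_quadruples; infer_instance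

-- ===== CLAIM (what is proved, stated in full; the proofs are below) =====
def Claim_equal_count_quadruples : Prop := ∀ (nums : List Int), Dom_count_quadruples nums → Spec_count_quadruples nums (count_quadruples nums)

-- ===== LEMMAS AND PROOFS =====

-- value at an index (both programs read nums[·] only at nonnegative in-range indices)
def pvVal (nums : List Int) (t : Int) : Int := PySem.List.pyGetD nums t 0

-- 0/1 indicator of A's quadruple condition
def pvInd (nums : List Int) (i j k l : Int) : Int :=
  if (pvVal nums i ≠ pvVal nums j ∧ pvVal nums j ≠ pvVal nums k ∧ pvVal nums k ≠ pvVal nums l) ∧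
      pvVal nums i + pvVal nums j + pvVal nums k + pvVal nums l = 0 then 1 else 0

-- the common mathematical value: the quadruple sum in A's loop order
def pvQuad (nums : List Int) : Int :=
  ∑ i ∈ Finset.range nums.length, ∑ j ∈ Finset.Ico (i+1) nums.length,
    ∑ k ∈ Finset.Ico (j+1) nums.length, ∑ l ∈ Finset.Ico (k+1) nums.length,
      pvInd nums (i:Int) (j:Int) (k:Int) (l:Int)

-- what B's two inner loops add for a fixed j (dict = value counts of the prefix nums[:j])
def pvTB (nums : List Int) (j : Nat) : Int :=
  ∑ k ∈ Finset.Ico (j+1) nums.length, ∑ l ∈ Finset.Ico (k+1) nums.length,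
    if pvVal nums j ≠ pvVal nums k ∧ pvVal nums k ≠ pvVal nums l ∧
        -(pvVal nums j + pvVal nums k + pvVal nums l) ≠ pvVal nums j then
      (((PySem.List.pyRange 0 (j:Int)).map (pvVal nums)).count
        (-(pvVal nums j + pvVal nums k + pvVal nums l)) : Int)
    else 0

-- B's loop step, named for the proofs (the port inlines it; definitionally equal)
def pvStep (nums : List Int) (st : PySem.Dict Int Int × Int) (j : Int) : PySem.Dict Int Int × Int :=
  let nj := PySem.List.pyGetD nums j 0
  let total := (PySem.List.pyRange (j+1) nums.length).foldl (fun total k =>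
      let nk := PySem.List.pyGetD nums k 0
      if nj ≠ nk then
        (PySem.List.pyRange (k+1) nums.length).foldl (fun total l =>
            let nl := PySem.List.pyGetD nums l 0
            if nk ≠ nl then
              let t := -(nj + nk + nl)
              if t ≠ nj then total + st.1.getD t 0 else total
            else total) total
      else total) st.2
  (st.1.insert nj (st.1.getD nj 0 + 1), total)

theorem pvRange_nil (a b : Int) (h : b ≤ a) : PySem.List.pyRange a b = [] := by
  apply List.eq_nil_iff_forall_not_mem.2
  intro x hx
  rw [PySem.List.mem_pyRange_one] at hx
  omega

theorem pvSum_map_pyRange (a b : Nat) (f : Int → Int) :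
    ((PySem.List.pyRange (a:Int) (b:Int)).map f).sum = ∑ x ∈ Finset.Ico a b, f (x:Int) := by
  induction b with
  | zero => rw [pvRange_nil _ _ (by omega)]; simp
  | succ b ih =>
    by_cases hab : a ≤ b
    · have h1 : ((b+1 : Nat) : Int) = (b : Int) + 1 := by push_cast; ring
      rw [h1, PySem.List.pyRange_one_succ_right (by exact_mod_cast hab), List.map_append,
        List.sum_append, ih, Finset.sum_Ico_succ_top hab]
      simp
    · rw [pvRange_nil _ _ (by exact_mod_cast (by omega : (b+1 : Nat) ≤ a)),
        Finset.Ico_eq_empty (by omega)]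
      simp

theorem pvSum0 (b : Nat) (f : Int → Int) :
    ((PySem.List.pyRange 0 (b:Int)).map f).sum = ∑ x ∈ Finset.range b, f (x:Int) := by
  rw [Finset.range_eq_Ico]
  have h := pvSum_map_pyRange 0 b f
  rwa [Nat.cast_zero] at h

theorem pvCount_prefix (nums : List Int) (j : Nat) (t : Int) :
    ((((PySem.List.pyRange 0 (j:Int)).map (pvVal nums)).count t : Nat) : Int)
      = ∑ i ∈ Finset.range j, (if pvVal nums (i:Int) = t then (1:Int) else 0) := by
  have h1 : ((PySem.List.pyRange 0 (j:Int)).map (pvVal nums)).count t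
      = (PySem.List.pyRange 0 (j:Int)).countP (fun i => pvVal nums i == t) := by
    simp [List.count, List.countP_map]; rfl
  rw [h1, ← PySem.List.sum_map_ite_one_zero (fun i => pvVal nums i == t), pvSum0]
  apply Finset.sum_congr rfl
  intro i _
  by_cases hv : pvVal nums (i:Int) = t <;> simp [hv]

theorem pvIteIteAdd (p q : Prop) [Decidable p] [Decidable q] (c v : Int) :
    (if p then (if q then c + v else c) else c) = c + (if p ∧ q then v else 0) := by
  by_cases hp : p <;> by_cases hq : q <;> simp [hp, hq]

theorem pvIteAdd (p : Prop) [Decidable p] (c v : Int) :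
    (if p then c + v else c) = c + (if p then v else 0) := by
  by_cases hp : p <;> simp [hp]

theorem pvA_eq_quad (nums : List Int) : count_quadruples nums = pvQuad nums := by
  unfold count_quadruples pvQuad
  simp only [pvIteIteAdd, PySem.List.foldl_add, zero_add]
  rw [pvSum0]
  refine Finset.sum_congr rfl (fun i _ => ?_)
  rw [show ((i:Int)+1) = ((i+1:Nat):Int) by push_cast; ring, pvSum_map_pyRange]
  refine Finset.sum_congr rfl (fun j _ => ?_)
  rw [show ((j:Int)+1) = ((j+1:Nat):Int) by push_cast; ring, pvSum_map_pyRange]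
  refine Finset.sum_congr rfl (fun k _ => ?_)
  rw [show ((k:Int)+1) = ((k+1:Nat):Int) by push_cast; ring, pvSum_map_pyRange]
  refine Finset.sum_congr rfl (fun l _ => ?_)
  rfl

theorem pvTB_eq (nums : List Int) (j : Nat) :
    pvTB nums j = ∑ i ∈ Finset.range j, ∑ k ∈ Finset.Ico (j+1) nums.length,
      ∑ l ∈ Finset.Ico (k+1) nums.length, pvInd nums (i:Int) (j:Int) (k:Int) (l:Int) := by
  unfold pvTB
  conv_rhs => rw [Finset.sum_comm]
  refine Finset.sum_congr rfl (fun k _ => ?_)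
  conv_rhs => rw [Finset.sum_comm]
  refine Finset.sum_congr rfl (fun l _ => ?_)
  by_cases hc : pvVal nums (j:Int) ≠ pvVal nums (k:Int) ∧ pvVal nums (k:Int) ≠ pvVal nums (l:Int) ∧
      -(pvVal nums (j:Int) + pvVal nums (k:Int) + pvVal nums (l:Int)) ≠ pvVal nums (j:Int)
  · rw [if_pos hc, pvCount_prefix]
    obtain ⟨h1, h2, h3⟩ := hc
    refine Finset.sum_congr rfl (fun i _ => ?_)
    unfold pvInd
    by_cases hv : pvVal nums (i:Int)
        = -(pvVal nums (j:Int) + pvVal nums (k:Int) + pvVal nums (l:Int))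
    · rw [if_pos hv, if_pos ⟨⟨by omega, h1, h2⟩, by omega⟩]
    · rw [if_neg hv, if_neg]
      rintro ⟨⟨hij, -, -⟩, hsum⟩
      exact hv (by omega)
  · rw [if_neg hc, eq_comm]
    apply Finset.sum_eq_zero
    intro i _
    unfold pvInd
    rw [if_neg]
    rintro ⟨⟨h1, h2, h3⟩, hsum⟩
    exact hc ⟨h2, h3, by omega⟩

theorem pvInner_total (nums : List Int) (d : PySem.Dict Int Int) (t0 : Int) (j : Nat)
    (hd : ∀ v, d.getD v 0 = (((PySem.List.pyRange 0 (j:Int)).map (pvVal nums)).count v : Int)) :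
    (PySem.List.pyRange ((j:Int)+1) nums.length).foldl (fun total k =>
        if PySem.List.pyGetD nums (j:Int) 0 ≠ PySem.List.pyGetD nums k 0 then
          (PySem.List.pyRange (k+1) nums.length).foldl (fun total l =>
              if PySem.List.pyGetD nums k 0 ≠ PySem.List.pyGetD nums l 0 then
                if -(PySem.List.pyGetD nums (j:Int) 0 + PySem.List.pyGetD nums k 0 + PySem.List.pyGetD nums l 0)
                    ≠ PySem.List.pyGetD nums (j:Int) 0 then
                  total + d.getD (-(PySem.List.pyGetD nums (j:Int) 0 + PySem.List.pyGetD nums k 0 +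
                    PySem.List.pyGetD nums l 0)) 0
                else total
              else total) total
        else total) t0 = t0 + pvTB nums j := by
  have hpv : ∀ t : Int, PySem.List.pyGetD nums t 0 = pvVal nums t := fun _ => rfl
  simp only [PySem.List.foldl_add, pvIteAdd, hpv]
  congr 1
  unfold pvTB
  rw [show ((j:Int)+1) = ((j+1:Nat):Int) by push_cast; ring, pvSum_map_pyRange]
  refine Finset.sum_congr rfl (fun k _ => ?_)
  by_cases hc1 : pvVal nums (j:Int) ≠ pvVal nums (k:Int)
  · rw [if_pos hc1, show ((k:Int)+1) = ((k+1:Nat):Int) by push_cast; ring, pvSum_map_pyRange]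
    refine Finset.sum_congr rfl (fun l _ => ?_)
    rw [hd]
    by_cases hc2 : pvVal nums (k:Int) ≠ pvVal nums (l:Int)
    · rw [if_pos hc2]
      by_cases hc3 : -(pvVal nums (j:Int) + pvVal nums (k:Int) + pvVal nums (l:Int)) ≠ pvVal nums (j:Int)
      · rw [if_pos hc3, if_pos ⟨hc1, hc2, hc3⟩]
      · rw [if_neg hc3, if_neg (by tauto)]
    · rw [if_neg hc2, if_neg (by tauto)]
  · rw [if_neg hc1, eq_comm]
    apply Finset.sum_eq_zero
    intro l _
    rw [if_neg (by tauto)]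

theorem pvB_loop (nums : List Int) (m : Nat) :
    (PySem.List.pyRange 0 (m:Int)).foldl (pvStep nums) (PySem.Dict.empty, 0)
      = (((PySem.List.pyRange 0 (m:Int)).map (pvVal nums)).foldl
          (fun d x => d.insert x (d.getD x 0 + 1)) PySem.Dict.empty,
        ∑ j ∈ Finset.range m, pvTB nums j) := by
  induction m with
  | zero =>
    rw [show ((0:Nat):Int) = 0 from rfl, pvRange_nil 0 0 le_rfl]
    simp
  | succ m ih =>
    rw [show ((m+1:Nat):Int) = (m:Int)+1 by push_cast; ring,
      PySem.List.pyRange_one_succ_right (by exact_mod_cast Nat.zero_le m),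
      List.foldl_append, ih, List.map_append, List.foldl_append]
    simp only [pvStep, List.map_cons, List.map_nil, List.foldl_cons, List.foldl_nil,
      Prod.mk.injEq]
    refine ⟨rfl, ?_⟩
    rw [pvInner_total nums _ _ m
        (fun v => by rw [PySem.Dict.getD_foldl_insert_add_one, PySem.Dict.getD_empty, zero_add]),
      Finset.sum_range_succ]

theorem pvB_eq_quad (nums : List Int) : count_quadruples_alt nums = pvQuad nums := by
  have h0 : count_quadruples_alt nums
      = ((PySem.List.pyRange 0 ((nums.length : Nat):Int)).foldl (pvStep nums) (PySem.Dict.empty, 0)).2 := rfl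
  rw [h0, pvB_loop]
  show ∑ j ∈ Finset.range nums.length, pvTB nums j = pvQuad nums
  calc ∑ j ∈ Finset.range nums.length, pvTB nums j
      = ∑ j ∈ Finset.range nums.length, ∑ i ∈ Finset.range j,
          ∑ k ∈ Finset.Ico (j+1) nums.length, ∑ l ∈ Finset.Ico (k+1) nums.length,
            pvInd nums (i:Int) (j:Int) (k:Int) (l:Int) :=
        Finset.sum_congr rfl (fun j _ => pvTB_eq nums j)
    _ = pvQuad nums := by
        unfold pvQuad
        simp only [Finset.range_eq_Ico]
        exact (Finset.sum_Ico_Ico_comm' 0 nums.length (fun i j =>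
          ∑ k ∈ Finset.Ico (j+1) nums.length, ∑ l ∈ Finset.Ico (k+1) nums.length,
            pvInd nums (i:Int) (j:Int) (k:Int) (l:Int))).symm

-- ===== VERDICT (by name: the statement is the Claim_ definition above) =====
theorem count_quadruples_spec : Claim_equal_count_quadruples := by
  intro nums _
  unfold Spec_count_quadruples
  rw [pvA_eq_quad, pvB_eq_quad]
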